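-- pv_equiv track=rewrite | github.com/vast-data/terraform-provider-vastdata | migration/migration_script.py | parse_nested_block
-- ===== SOURCE A (Python) =====
-- def parse_nested_block(lines, start_index):
--     attrs = {}
--     i = start_index
--     brace_level = 0
--     block_lines = []
--     while i < len(lines):
--         line = lines[i]
--         brace_level += line.count("{") - line.count("}")
--         block_lines.append(line.strip())
--         i += 1
--         if brace_level == 0:
--             break
--
--     for line in block_lines:
--         if "=" in line and not line.strip().endswith("{"):
--             key, val = map(str.strip, line.split("=", 1))
--             attrs[key] = val
--     return attrs, i - start_index
-- ===== SOURCE B (Python) =====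
-- def parse_nested_block(lines, start_index):
--     # Single fused pass: track brace_level and attrs together, no block_lines buffer.
--     attrs = {}
--     i = start_index
--     brace_level = 0
--     while i < len(lines):
--         line = lines[i]
--         brace_level += line.count("{") - line.count("}")
--         stripped = line.strip()
--         i += 1
--         if "=" in stripped and not stripped.endswith("{"):
--             key, val = map(str.strip, stripped.split("=", 1))
--             attrs[key] = val
--         if brace_level == 0:
--             break
--     return attrs, i - start_index
-- ===== Notes on version B (the rewrite author's own statement) =====
-- stated objective: simpler
-- what changed: Fuses A's two loops into one pass that maintains brace_level and attrs together, eliminating the intermediate block_lines buffer.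
import Mathlib
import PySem

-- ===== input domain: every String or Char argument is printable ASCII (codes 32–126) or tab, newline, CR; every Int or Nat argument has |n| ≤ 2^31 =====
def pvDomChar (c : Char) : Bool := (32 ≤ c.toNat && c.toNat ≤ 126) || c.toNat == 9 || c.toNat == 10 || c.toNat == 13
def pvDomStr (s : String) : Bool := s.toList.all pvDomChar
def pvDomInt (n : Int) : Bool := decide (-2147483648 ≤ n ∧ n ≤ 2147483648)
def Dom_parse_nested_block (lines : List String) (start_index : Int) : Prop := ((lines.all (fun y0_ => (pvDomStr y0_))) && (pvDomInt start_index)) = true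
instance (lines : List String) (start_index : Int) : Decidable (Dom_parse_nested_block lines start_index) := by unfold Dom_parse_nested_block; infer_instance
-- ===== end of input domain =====

-- B fuses A's two loops into one pass (brace_level and attrs maintained together, no block_lines buffer); same return value.

-- ===== PORT A =====
-- A's second loop body: parse one (already stripped) block line into attrs.
-- 'line.split("=", 1)' is PySem.Str.splitMax? line "=" 1; the guard guarantees two parts.
def pvParseLine (attrs : PySem.Dict String String) (line : String) : PySem.Dict String String :=
  if PySem.Str.isIn "=" line && !(PySem.Str.endswith (PySem.Str.strip line) "{") then
    match PySem.Str.splitMax? line "=" 1 with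
    | some [k, v] => attrs.insert (PySem.Str.strip k) (PySem.Str.strip v)
    | _ => attrs
  else attrs

-- A's first (while) loop: collect stripped block lines, track brace_level, return (block_lines, i).
-- fuel = (len(lines) - i).toNat, the exact number of remaining loop iterations possible (totalization only).
-- where Python would raise IndexError (i < -len), pyGetD's default is never claimed (excluded by Pre_).
def pvALoop (lines : List String) (fuel : Nat) (i : Int) (brace_level : Int)
    (block_lines : List String) : List String × Int :=
  match fuel with
  | 0 => (block_lines, i)
  | fuel + 1 =>
    if i < (lines.length : Int) then
      let line := PySem.List.pyGetD lines i ""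
      let bl' := brace_level + (PySem.Str.count line "{" : Int) - (PySem.Str.count line "}" : Int)
      let acc' := block_lines ++ [PySem.Str.strip line]
      if bl' = 0 then (acc', i + 1) else pvALoop lines fuel (i + 1) bl' acc'
    else (block_lines, i)

def parse_nested_block (lines : List String) (start_index : Int) : (List (String × String)) × Int :=
  let r := pvALoop lines ((lines.length : Int) - start_index).toNat start_index 0 []
  ((r.1.foldl pvParseLine PySem.Dict.empty).items, r.2 - start_index)

-- ===== PORT B =====
-- B's single fused loop: brace_level and attrs updated together, then break on brace_level == 0.
def pvBLoop (lines : List String) (fuel : Nat) (i : Int) (brace_level : Int)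
    (attrs : PySem.Dict String String) : PySem.Dict String String × Int :=
  match fuel with
  | 0 => (attrs, i)
  | fuel + 1 =>
    if i < (lines.length : Int) then
      let line := PySem.List.pyGetD lines i ""
      let bl' := brace_level + (PySem.Str.count line "{" : Int) - (PySem.Str.count line "}" : Int)
      let stripped := PySem.Str.strip line
      let attrs' :=
        if PySem.Str.isIn "=" stripped && !(PySem.Str.endswith stripped "{") then
          match PySem.Str.splitMax? stripped "=" 1 with
          | some [k, v] => attrs.insert (PySem.Str.strip k) (PySem.Str.strip v)
          | _ => attrs
        else attrs
      if bl' = 0 then (attrs', i + 1) else pvBLoop lines fuel (i + 1) bl' attrs'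
    else (attrs, i)

def parse_nested_block_alt (lines : List String) (start_index : Int) : (List (String × String)) × Int :=
  let r := pvBLoop lines ((lines.length : Int) - start_index).toNat start_index 0 PySem.Dict.empty
  (r.1.items, r.2 - start_index)

-- ===== PRECONDITION & SPEC =====
-- Python A raises IndexError when start_index < -len(lines) (the first lines[i] access); excluded.
def Pre_parse_nested_block (lines : List String) (start_index : Int) : Prop :=
  -(lines.length : Int) ≤ start_index
instance (lines : List String) (start_index : Int) : Decidable (Pre_parse_nested_block lines start_index) := by unfold Pre_parse_nested_block; infer_instance

def pvWitness_parse_nested_block : List String × Int := ([], 0)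

def Spec_parse_nested_block (lines : List String) (start_index : Int) (out : (List (String × String)) × Int) : Prop := out = parse_nested_block_alt lines start_index
instance (lines : List String) (start_index : Int) (out : (List (String × String)) × Int) : Decidable (Spec_parse_nested_block lines start_index out) := by unfold Spec_parse_nested_block; infer_instance

-- ===== CLAIM (what is proved, stated in full; the proofs are below) =====
def Claim_equal_parse_nested_block : Prop := ∀ (lines : List String) (start_index : Int), Dom_parse_nested_block lines start_index → Pre_parse_nested_block lines start_index → Spec_parse_nested_block lines start_index (parse_nested_block lines start_index)

-- ===== LEMMAS AND PROOFS =====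

lemma pv_strip_idem_chars (s : List Char) :
    PySem.Chars.strip (PySem.Chars.strip s) = PySem.Chars.strip s := by
  simp only [PySem.Chars.strip, PySem.Chars.lstrip, PySem.Chars.rstrip]
  change List.rdropWhile _ (List.dropWhile _ (List.rdropWhile _ (List.dropWhile _ s)))
      = List.rdropWhile _ (List.dropWhile _ s)
  have h1 : List.dropWhile PySem.Chars.isspace
      (List.rdropWhile PySem.Chars.isspace (List.dropWhile PySem.Chars.isspace s))
      = List.rdropWhile PySem.Chars.isspace (List.dropWhile PySem.Chars.isspace s) := by
    rw [List.dropWhile_eq_self_iff]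
    intro hl
    have hp := List.rdropWhile_prefix PySem.Chars.isspace (List.dropWhile PySem.Chars.isspace s)
    rw [hp.getElem hl]
    exact List.dropWhile_eq_self_iff.mp (List.dropWhile_idempotent PySem.Chars.isspace s)
      (lt_of_lt_of_le hl hp.length_le)
  rw [h1, List.rdropWhile_idempotent]

lemma pv_strip_idem (s : String) :
    PySem.Str.strip (PySem.Str.strip s) = PySem.Str.strip s := by
  apply String.ext
  rw [PySem.Str.toList_strip, PySem.Str.toList_strip]
  exact pv_strip_idem_chars s.toList

-- A's collect-then-fold equals B's fused loop, for any fuel and pending buffer/dict state.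
lemma pv_loop_eq (lines : List String) :
    ∀ (fuel : ℕ) (i brace_level : Int) (acc : List String)
      (d : PySem.Dict String String),
      ((pvALoop lines fuel i brace_level acc).1.foldl pvParseLine d,
        (pvALoop lines fuel i brace_level acc).2)
        = pvBLoop lines fuel i brace_level (acc.foldl pvParseLine d) := by
  intro fuel
  induction fuel with
  | zero => intro i brace_level acc d; rfl
  | succ fuel ih =>
    intro i brace_level acc d
    rw [pvALoop, pvBLoop]
    by_cases h : i < (lines.length : Int)
    · simp only [if_pos h]
      by_cases h0 : brace_level + (PySem.Str.count (PySem.List.pyGetD lines i "") "{" : Int)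
          - (PySem.Str.count (PySem.List.pyGetD lines i "") "}" : Int) = 0
      · simp only [if_pos h0, List.foldl_append, List.foldl_cons, List.foldl_nil,
          pvParseLine, pv_strip_idem]
      · simp only [if_neg h0]
        rw [ih]
        simp only [List.foldl_append, List.foldl_cons, List.foldl_nil,
          pvParseLine, pv_strip_idem]
    · simp only [if_neg h]

-- ===== VERDICT (by name: the statement is the Claim_ definition above) =====
theorem parse_nested_block_spec : Claim_equal_parse_nested_block := by
  intro lines start_index _ _
  unfold Spec_parse_nested_block parse_nested_block parse_nested_block_alt
  have h := pv_loop_eq lines ((lines.length : Int) - start_index).toNat start_index 0 [] PySem.Dict.empty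
  simp only [List.foldl_nil] at h
  simp only [Prod.ext_iff] at h ⊢
  exact ⟨by rw [h.1], by rw [h.2]⟩
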